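-- pv_equiv track=rewrite | github.com/Karan9034/codeforces | educational128/problemB.py | check
-- ===== SOURCE A (Python) =====
-- def check(n, m, arr):
--     pr = []
--     for i in range(n):
--         for j in range(m):
--             if arr[i][j] == 'R' and not pr:
--                 pr.append(i)
--                 pr.append(j)
--                 continue
--             if arr[i][j] == 'R' and ((i < pr[0] and j > pr[1]) or (i > pr[0] and j < pr[1])):
--                 return "NO"
--     return "YES"
-- ===== SOURCE B (Python) =====
-- def check(n, m, arr):
--     ok = True
--     suff = m
--     for i in reversed(range(n)):
--         lead = next((j for j in range(m) if arr[i][j] == 'R'), m)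
--         if lead < m:
--             ok = suff >= lead
--         suff = min(suff, lead)
--     return "YES" if ok else "NO"
-- ===== Notes on version B (the rewrite author's own statement) =====
-- stated objective: alternative
-- what changed: A's forward fused scan carrying the first rook's mutable coordinates and a two-disjunct violation test is replaced by a single backward pass over rows maintaining a suffix-minimum of each row's leftmost-rook column: at each occupied row the verdict is recomputed as 'suffix-min >= leftmost', so the last (i.e. row-major first) occupied row processed determines the answer and no first-rook search or coordinate pair is kept.
-- outside the precondition, e.g. on check(2, 2, ['.R', 'R']): A returns 'NO', B returns 'NO'
import Mathlib
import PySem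

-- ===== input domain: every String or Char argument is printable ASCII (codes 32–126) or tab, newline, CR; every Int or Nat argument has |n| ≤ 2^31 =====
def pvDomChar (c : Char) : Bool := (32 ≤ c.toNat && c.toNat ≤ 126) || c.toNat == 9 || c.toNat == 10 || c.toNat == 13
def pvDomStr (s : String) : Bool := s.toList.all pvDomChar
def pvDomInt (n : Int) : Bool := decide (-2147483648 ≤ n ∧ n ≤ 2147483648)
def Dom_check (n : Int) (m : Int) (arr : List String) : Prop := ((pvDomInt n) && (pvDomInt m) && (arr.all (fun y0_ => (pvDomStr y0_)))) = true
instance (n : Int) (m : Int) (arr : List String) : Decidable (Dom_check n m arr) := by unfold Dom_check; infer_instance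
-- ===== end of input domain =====

-- B replaces A's forward scan carrying the first rook's coordinates by ONE backward pass over
-- rows keeping a suffix minimum of each row's leftmost-rook column; no first-rook search remains.

-- shared cell accessor: arr[i][j] == 'R' (the defaults are unreachable under Pre_check,
-- where both indexings are in range exactly as in Python)
def pvIsR (arr : List String) (i j : Int) : Bool :=
  match PySem.List.pyGet? arr i with
  | none => false
  | some s => (PySem.Str.pyGet? s j).getD ' ' == 'R'

-- ===== PORT A =====
-- A's loop state: (early-return value if any, pr); the two ifs in A's body, in order
def pvStepA (arr : List String) (st : Option String × List Int) (p : Int × Int) :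
    Option String × List Int :=
  match st with
  | (some s, pr) => (some s, pr)
  | (none, pr) =>
    if pvIsR arr p.1 p.2 && pr.isEmpty then (none, [p.1, p.2])
    else if pvIsR arr p.1 p.2 &&
        ((decide (p.1 < PySem.List.pyGetD pr 0 0) && decide (p.2 > PySem.List.pyGetD pr 1 0)) ||
         (decide (p.1 > PySem.List.pyGetD pr 0 0) && decide (p.2 < PySem.List.pyGetD pr 1 0))) then
      (some "NO", pr)
    else (none, pr)

def check (n : Int) (m : Int) (arr : List String) : String :=
  let r :=
    (PySem.List.pyRange 0 n 1).foldl
      (fun st i =>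
        (PySem.List.pyRange 0 m 1).foldl (fun st2 j => pvStepA arr st2 (i, j)) st)
      ((none : Option String), ([] : List Int))
  match r with
  | (some s, _) => s
  | (none, _) => "YES"

-- ===== PORT B =====
-- lead = next((j for j in range(m) if arr[i][j] == 'R'), m)
def pvLead (arr : List String) (m i : Int) : Int :=
  (((PySem.List.pyRange 0 m 1).find? (fun j => pvIsR arr i j)).getD m)

-- one backward pass (reversed(range(n))) with state (ok, suff)
def check_alt (n : Int) (m : Int) (arr : List String) : String :=
  let res :=
    ((PySem.List.pyRange 0 n 1).reverse).foldl
      (fun (st : Bool × Int) i =>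
        let lead := pvLead arr m i
        (if lead < m then decide (st.2 ≥ lead) else st.1, min st.2 lead))
      (true, m)
  if res.1 then "YES" else "NO"

-- ===== PRECONDITION & SPEC =====
-- Pre_ excludes ragged inputs whose first n rows are not all of length ≥ m (or fewer than n rows):
-- there A's arr[i][j] generally raises IndexError; on the few such inputs where A still returns
-- "NO" before reaching any short row, B returns the same "NO" (see cites).
def Pre_check (n : Int) (m : Int) (arr : List String) : Prop :=
  0 < n → 0 < m →
    n ≤ (arr.length : Int) ∧ ∀ s ∈ arr.take n.toNat, m ≤ (s.toList.length : Int)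
instance (n : Int) (m : Int) (arr : List String) : Decidable (Pre_check n m arr) := by
  unfold Pre_check; infer_instance

def pvWitness_check : Int × Int × List String := (2, 2, ["R.", ".R"])

def Spec_check (n : Int) (m : Int) (arr : List String) (out : String) : Prop := out = check_alt n m arr
instance (n : Int) (m : Int) (arr : List String) (out : String) : Decidable (Spec_check n m arr out) := by unfold Spec_check; infer_instance

-- ===== CLAIM (what is proved, stated in full; the proofs are below) =====
def Claim_equal_check : Prop := ∀ (n : Int) (m : Int) (arr : List String), Dom_check n m arr → Pre_check n m arr → Spec_check n m arr (check n m arr)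

-- ===== LEMMAS AND PROOFS =====

-- the common spec both programs are reduced to, by recursion on the (forward) row list
def pvMinLead (arr : List String) (m : Int) (L : List Int) : Int :=
  L.foldr (fun i a => min a (pvLead arr m i)) m

def pvSpec (arr : List String) (m : Int) : List Int → String
  | [] => "YES"
  | i :: L =>
    if pvLead arr m i < m then
      (if pvMinLead arr m L < pvLead arr m i then "NO" else "YES")
    else pvSpec arr m L

theorem pvSpec_cases (arr : List String) (m : Int) (L : List Int) :
    pvSpec arr m L = "YES" ∨ pvSpec arr m L = "NO" := by
  induction L with
  | nil => left; rfl
  | cons i L ih =>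
    simp only [pvSpec]
    split_ifs <;> simp [ih]

-- lead facts
theorem pvLead_mem (arr : List String) (m i : Int) (h : pvLead arr m i < m) :
    0 ≤ pvLead arr m i ∧ pvLead arr m i < m ∧ pvIsR arr i (pvLead arr m i) = true := by
  unfold pvLead at *
  cases hf : (PySem.List.pyRange 0 m 1).find? (fun j => pvIsR arr i j) with
  | none => rw [hf] at h; simp at h
  | some j =>
    have hm := PySem.List.mem_pyRange_one.mp (List.mem_of_find?_eq_some hf)
    have hp := List.find?_some hf
    simp at hp ⊢
    exact ⟨hm.1, hm.2, hp⟩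

theorem pvLead_min (arr : List String) (m i j : Int) (h0 : 0 ≤ j) (hm : j < m)
    (hR : pvIsR arr i j = true) : pvLead arr m i ≤ j := by
  by_contra hlt
  rw [not_le] at hlt
  unfold pvLead at hlt
  cases hf : (PySem.List.pyRange 0 m 1).find? (fun j => pvIsR arr i j) with
  | none =>
    have := List.find?_eq_none.mp hf j (PySem.List.mem_pyRange_one.mpr ⟨h0, hm⟩)
    simp [hR] at this
  | some c =>
    rw [hf] at hlt; simp at hlt
    rcases List.find?_eq_some_iff_append.mp hf with ⟨_, l₁, l₂, hsplit, hcl⟩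
    have hpw := PySem.List.pairwise_lt_pyRange_one (a := 0) (b := m)
    rw [hsplit] at hpw
    have hjmem : j ∈ l₁ ++ c :: l₂ := by
      rw [← hsplit]; exact PySem.List.mem_pyRange_one.mpr ⟨h0, hm⟩
    rcases List.mem_append.mp hjmem with h1 | h2
    · have := hcl j h1; simp [hR] at this
    · rcases List.mem_cons.mp h2 with rfl | hl2
      · omega
      · have hpw2 := (List.pairwise_append.mp hpw).2.1
        have := (List.pairwise_cons.mp hpw2).1 j hl2
        omega

-- A's state once set to an early return is absorbing
theorem pvStepA_absorb (arr : List String) (L : List (Int × Int)) (s : String) (pr : List Int) :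
    L.foldl (pvStepA arr) (some s, pr) = (some s, pr) := by
  induction L with
  | nil => rfl
  | cons p L ih => simpa [pvStepA] using ih

-- a run over rook-free cells leaves the empty state unchanged
theorem pvStepA_clean (arr : List String) (L : List (Int × Int))
    (h : ∀ p ∈ L, pvIsR arr p.1 p.2 = false) :
    L.foldl (pvStepA arr) (none, ([] : List Int)) = (none, ([] : List Int)) := by
  induction L with
  | nil => rfl
  | cons p L ih =>
    have hp := h p (by simp)
    simp only [List.foldl_cons, pvStepA, hp]
    exact ih (fun q hq => h q (List.mem_cons_of_mem _ hq))

-- the violation test A performs once pr = [r, c]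
def pvViol (arr : List String) (r c : Int) (p : Int × Int) : Bool :=
  pvIsR arr p.1 p.2 &&
    ((decide (p.1 < r) && decide (p.2 > c)) || (decide (p.1 > r) && decide (p.2 < c)))

-- A's second if with pr = [r, c] is exactly the violation test
theorem pvStepA_step (arr : List String) (r c : Int) (p : Int × Int) :
    pvStepA arr (none, [r, c]) p =
      if pvViol arr r c p then (some "NO", [r, c]) else (none, [r, c]) := by
  have h0 : PySem.List.pyGetD [r, c] 0 0 = r := by simp [pysem]
  have h1 : PySem.List.pyGetD [r, c] 1 0 = c := by simp [pysem]
  simp only [pvStepA, pvViol, h0, h1, List.isEmpty_cons, Bool.and_false, Bool.false_eq_true,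
    if_false]
  rfl

-- once pr = [r, c], a run returns "NO" iff some remaining cell violates
theorem pvStepA_set (arr : List String) (L : List (Int × Int)) (r c : Int) :
    L.foldl (pvStepA arr) (none, [r, c]) =
      (if L.any (pvViol arr r c) then (some "NO", [r, c]) else (none, [r, c])) := by
  induction L with
  | nil => rfl
  | cons p L ih =>
    rw [List.foldl_cons, pvStepA_step]
    by_cases hv : pvViol arr r c p = true
    · simp only [hv, if_true, pvStepA_absorb, List.any_cons, Bool.true_or]
    · simp only [Bool.not_eq_true] at hv
      simp only [hv, Bool.false_eq_true, if_false, ih, List.any_cons, Bool.false_or]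

-- A's inner loop as a fold over the mapped cell list of row i
theorem inner_eq_map (arr : List String) (m : Int) (i : Int) (st : Option String × List Int) :
    (PySem.List.pyRange 0 m 1).foldl (fun st2 j => pvStepA arr st2 (i, j)) st =
      ((PySem.List.pyRange 0 m 1).map (fun j => (i, j))).foldl (pvStepA arr) st := by
  rw [List.foldl_map]

-- a row's inner loop from the empty state: records (i, lead i) iff the row has a rook
theorem inner_empty (arr : List String) (m i : Int) :
    (PySem.List.pyRange 0 m 1).foldl (fun st2 j => pvStepA arr st2 (i, j))
        ((none : Option String), ([] : List Int)) =
      if pvLead arr m i < m then ((none : Option String), [i, pvLead arr m i])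
      else ((none : Option String), ([] : List Int)) := by
  rw [inner_eq_map]
  cases hf : (PySem.List.pyRange 0 m 1).find? (fun j => pvIsR arr i j) with
  | none =>
    have hlead : pvLead arr m i = m := by simp [pvLead, hf]
    rw [pvStepA_clean]
    · simp [hlead]
    · intro p hp
      rcases List.mem_map.mp hp with ⟨j, hj, rfl⟩
      simpa using List.find?_eq_none.mp hf j hj
  | some c =>
    have hlead : pvLead arr m i = c := by simp [pvLead, hf]
    have hcm := PySem.List.mem_pyRange_one.mp (List.mem_of_find?_eq_some hf)
    rcases List.find?_eq_some_iff_append.mp hf with ⟨hR0, l₁, l₂, hsplit, hcl⟩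
    have hR : pvIsR arr i c = true := by simpa using hR0
    rw [hsplit, List.map_append, List.map_cons, List.foldl_append, List.foldl_cons]
    rw [pvStepA_clean]
    · have hstep : pvStepA arr ((none : Option String), ([] : List Int)) (i, c) =
          ((none : Option String), [i, c]) := by
        simp [pvStepA, hR]
      rw [hstep, pvStepA_set]
      have hany : (l₂.map (fun j => (i, j))).any (pvViol arr i c) = false := by
        simp only [List.any_map, List.any_eq_false]
        intro j _
        simp [pvViol, Function.comp]
      rw [hany]
      simp [hlead, hcm.2]
    · intro p hp
      rcases List.mem_map.mp hp with ⟨j, hj, rfl⟩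
      simpa using hcl j hj

-- a row's inner loop once pr = [r, c] with r < i and c < m: "NO" iff lead i < c
theorem inner_set (arr : List String) (m i r c : Int) (hir : r < i) (hcm : c < m) :
    (PySem.List.pyRange 0 m 1).foldl (fun st2 j => pvStepA arr st2 (i, j))
        ((none : Option String), [r, c]) =
      if pvLead arr m i < c then ((some "NO" : Option String), [r, c])
      else ((none : Option String), [r, c]) := by
  rw [inner_eq_map, pvStepA_set]
  have hany : ((PySem.List.pyRange 0 m 1).map (fun j => (i, j))).any (pvViol arr r c) =
      decide (pvLead arr m i < c) := by
    rw [Bool.eq_iff_iff]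
    simp only [List.any_map, List.any_eq_true, Function.comp, pvViol, Bool.and_eq_true,
      Bool.or_eq_true, decide_eq_true_eq, PySem.List.mem_pyRange_one]
    constructor
    · rintro ⟨j, ⟨hj0, hjm⟩, hR, hd⟩
      rcases hd with ⟨h1, _⟩ | ⟨_, h2⟩
      · omega
      · have := pvLead_min arr m i j hj0 hjm hR; omega
    · intro hlt
      have hlm : pvLead arr m i < m := by omega
      obtain ⟨h0, hm', hR⟩ := pvLead_mem arr m i hlm
      exact ⟨pvLead arr m i, ⟨h0, hm'⟩, hR, Or.inr ⟨hir, hlt⟩⟩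
  rw [hany]
  by_cases h : pvLead arr m i < c <;> simp [h]

-- at outer level, an early-returned state is absorbing
theorem outer_absorb (arr : List String) (m : Int) (L : List Int) (s : String) (pr : List Int) :
    L.foldl
        (fun st i => (PySem.List.pyRange 0 m 1).foldl (fun st2 j => pvStepA arr st2 (i, j)) st)
        ((some s : Option String), pr) = ((some s : Option String), pr) := by
  induction L with
  | nil => rfl
  | cons i L ih =>
    rw [List.foldl_cons, inner_eq_map, pvStepA_absorb]
    exact ih

-- outer loop once pr = [r, c] over rows all beyond r: "NO" iff some later row leads left of c
theorem outer_set (arr : List String) (m : Int) (L : List Int) (r c : Int) (hcm : c < m)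
    (hgt : ∀ x ∈ L, r < x) :
    L.foldl
        (fun st i => (PySem.List.pyRange 0 m 1).foldl (fun st2 j => pvStepA arr st2 (i, j)) st)
        ((none : Option String), [r, c]) =
      if pvMinLead arr m L < c then ((some "NO" : Option String), [r, c])
      else ((none : Option String), [r, c]) := by
  induction L with
  | nil =>
    simp [pvMinLead, not_lt.mpr (le_of_lt hcm)]
  | cons i L ih =>
    have hgt' : ∀ x ∈ L, r < x := fun x hx => hgt x (List.mem_cons_of_mem _ hx)
    rw [List.foldl_cons, inner_set arr m i r c (hgt i (by simp)) hcm]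
    have hmin : pvMinLead arr m (i :: L) = min (pvMinLead arr m L) (pvLead arr m i) := rfl
    by_cases hl : pvLead arr m i < c
    · rw [if_pos hl, outer_absorb, hmin, if_pos (by omega)]
    · rw [if_neg hl, ih hgt', hmin]
      by_cases h2 : pvMinLead arr m L < c
      · rw [if_pos h2, if_pos (by omega)]
      · rw [if_neg h2, if_neg (by omega)]

-- A over a strictly increasing row list computes pvSpec
theorem A_run (arr : List String) (m : Int) (L : List Int) (hpw : L.Pairwise (· < ·)) :
    (match L.foldl
        (fun st i => (PySem.List.pyRange 0 m 1).foldl (fun st2 j => pvStepA arr st2 (i, j)) st)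
        ((none : Option String), ([] : List Int)) with
      | (some s, _) => s
      | (none, _) => "YES") = pvSpec arr m L := by
  induction L with
  | nil => rfl
  | cons i L ih =>
    have hgt : ∀ x ∈ L, i < x := (List.pairwise_cons.mp hpw).1
    have hpw' := (List.pairwise_cons.mp hpw).2
    rw [List.foldl_cons, inner_empty]
    by_cases hl : pvLead arr m i < m
    · rw [if_pos hl, outer_set arr m L i (pvLead arr m i) hl hgt]
      simp only [pvSpec, if_pos hl]
      by_cases h2 : pvMinLead arr m L < pvLead arr m i
      · rw [if_pos h2, if_pos h2]
      · rw [if_neg h2, if_neg h2]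
    · rw [if_neg hl]
      simp only [pvSpec, if_neg hl]
      exact ih hpw'

-- B's backward fold computes (pvSpec == "YES", pvMinLead)
theorem B_run (arr : List String) (m : Int) (L : List Int) :
    L.foldr
        (fun i (st : Bool × Int) =>
          (if pvLead arr m i < m then decide (st.2 ≥ pvLead arr m i) else st.1,
            min st.2 (pvLead arr m i)))
        (true, m) =
      ((pvSpec arr m L == "YES"), pvMinLead arr m L) := by
  induction L with
  | nil => rfl
  | cons i L ih =>
    rw [List.foldr_cons, ih]
    have hmin : pvMinLead arr m (i :: L) = min (pvMinLead arr m L) (pvLead arr m i) := rfl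
    simp only [pvSpec, hmin]
    by_cases hl : pvLead arr m i < m
    · rw [if_pos hl, if_pos hl]
      by_cases h2 : pvMinLead arr m L < pvLead arr m i
      · rw [if_pos h2]
        simp; omega
      · rw [if_neg h2]
        simp; omega
    · rw [if_neg hl, if_neg hl]

-- B's foldl over the reversed row list equals the same backward recursion
theorem B_run_rev (arr : List String) (m : Int) (L : List Int) :
    (L.reverse).foldl
        (fun (st : Bool × Int) i =>
          (if pvLead arr m i < m then decide (st.2 ≥ pvLead arr m i) else st.1,
            min st.2 (pvLead arr m i)))
        (true, m) =
      ((pvSpec arr m L == "YES"), pvMinLead arr m L) := by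
  rw [List.foldl_reverse]
  exact B_run arr m L

-- ===== VERDICT (by name: the statement is the Claim_ definition above) =====
theorem check_spec : Claim_equal_check := by
  intro n m arr _ _
  show check n m arr = check_alt n m arr
  have hA : check n m arr = pvSpec arr m (PySem.List.pyRange 0 n 1) :=
    A_run arr m _ (PySem.List.pairwise_lt_pyRange_one 0 n)
  have hC : check_alt n m arr =
      (if (pvSpec arr m (PySem.List.pyRange 0 n 1) == "YES") = true then "YES" else "NO") := by
    calc check_alt n m arr
        = (if (((PySem.List.pyRange 0 n 1).reverse).foldl
            (fun (st : Bool × Int) i =>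
              (if pvLead arr m i < m then decide (st.2 ≥ pvLead arr m i) else st.1,
                min st.2 (pvLead arr m i))) (true, m)).1 = true then "YES" else "NO") := rfl
      _ = _ := by rw [B_run_rev]
  rw [hA, hC]
  rcases pvSpec_cases arr m (PySem.List.pyRange 0 n 1) with h | h <;> simp [h]
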